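-- pv_equiv track=rewrite | github.com/BookHsu/Libro.AgentWCAG | skills/libro-agent-wcag/scripts/run_accessibility_audit.py | _build_rule_sources
-- ===== SOURCE A (Python) =====
-- def _build_rule_sources(
--     bundle_rules: list[str],
--     preset_rules: list[str],
--     config_rules: list[str],
--     cli_rules: list[str],
-- ) -> dict[str, str]:
--     sources: dict[str, str] = {}
--     for rule in bundle_rules:
--         if rule not in sources:
--             sources[rule] = "policy-bundle"
--     for rule in preset_rules:
--         if rule not in sources:
--             sources[rule] = "policy-preset"
--     for rule in config_rules:
--         if rule not in sources:
--             sources[rule] = "policy-config"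
--     for rule in cli_rules:
--         if rule not in sources:
--             sources[rule] = "cli"
--     return sources
-- ===== SOURCE B (Python) =====
-- def _build_rule_sources(
--     bundle_rules: list[str],
--     preset_rules: list[str],
--     config_rules: list[str],
--     cli_rules: list[str],
-- ) -> dict[str, str]:
--     in_bundle = set(bundle_rules)
--     in_preset = set(preset_rules)
--     in_config = set(config_rules)
--
--     def label(rule: str) -> str:
--         if rule in in_bundle:
--             return "policy-bundle"
--         if rule in in_preset:
--             return "policy-preset"
--         if rule in in_config:
--             return "policy-config"
--         return "cli"
--
--     ordered_rules = dict.fromkeys(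
--         bundle_rules + preset_rules + config_rules + cli_rules
--     )
--     return {rule: label(rule) for rule in ordered_rules}
-- ===== Notes on version B (the rewrite author's own statement) =====
-- stated objective: alternative
-- what changed: Instead of A's incremental dict accumulation with an 'if rule not in sources' guard in each of four loops, B first computes the ordered distinct key list once (dict.fromkeys of the concatenation) and then classifies each key independently by membership in three precomputed sets, so no mutable first-wins accumulator exists at all.
import Mathlib
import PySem

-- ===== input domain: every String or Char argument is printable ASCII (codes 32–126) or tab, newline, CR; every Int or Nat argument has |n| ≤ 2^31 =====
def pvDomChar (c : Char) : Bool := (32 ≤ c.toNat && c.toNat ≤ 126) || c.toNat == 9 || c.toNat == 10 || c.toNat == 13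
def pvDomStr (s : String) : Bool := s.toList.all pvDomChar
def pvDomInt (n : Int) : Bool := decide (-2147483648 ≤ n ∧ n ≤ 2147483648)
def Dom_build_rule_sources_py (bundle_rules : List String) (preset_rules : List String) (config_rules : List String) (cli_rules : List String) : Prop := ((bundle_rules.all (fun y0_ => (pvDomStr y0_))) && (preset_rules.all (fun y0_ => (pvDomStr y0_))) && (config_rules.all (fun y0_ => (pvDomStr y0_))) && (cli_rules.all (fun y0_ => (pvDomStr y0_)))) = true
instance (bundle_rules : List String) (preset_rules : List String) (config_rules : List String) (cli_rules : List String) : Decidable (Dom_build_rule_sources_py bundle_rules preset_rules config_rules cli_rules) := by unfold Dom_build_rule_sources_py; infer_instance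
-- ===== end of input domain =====

-- B replaces A's incremental guarded dict accumulation by one ordered dedup of the
-- concatenated lists followed by an independent membership-based classification of
-- each key; objective: alternative, same cost.

-- ===== PORT A =====
def build_rule_sources_py (bundle_rules : List String) (preset_rules : List String) (config_rules : List String) (cli_rules : List String) : List (String × String) :=
  let sources : PySem.Dict String String := PySem.Dict.empty
  let sources := bundle_rules.foldl (fun s rule =>
    if s.contains rule then s else s.insert rule "policy-bundle") sources
  let sources := preset_rules.foldl (fun s rule =>
    if s.contains rule then s else s.insert rule "policy-preset") sources
  let sources := config_rules.foldl (fun s rule =>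
    if s.contains rule then s else s.insert rule "policy-config") sources
  let sources := cli_rules.foldl (fun s rule =>
    if s.contains rule then s else s.insert rule "cli") sources
  sources.items

-- ===== PORT B =====
def build_rule_sources_py_alt (bundle_rules : List String) (preset_rules : List String) (config_rules : List String) (cli_rules : List String) : List (String × String) :=
  let inBundle := PySem.Set.ofList bundle_rules
  let inPreset := PySem.Set.ofList preset_rules
  let inConfig := PySem.Set.ofList config_rules
  let label := fun (rule : String) =>
    if inBundle.contains rule then "policy-bundle"
    else if inPreset.contains rule then "policy-preset"
    else if inConfig.contains rule then "policy-config"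
    else "cli"
  (PySem.List.dedup (bundle_rules ++ preset_rules ++ config_rules ++ cli_rules)).map
    (fun rule => (rule, label rule))

-- ===== PRECONDITION & SPEC =====
def Spec_build_rule_sources_py (bundle_rules : List String) (preset_rules : List String) (config_rules : List String) (cli_rules : List String) (out : List (String × String)) : Prop := out = build_rule_sources_py_alt bundle_rules preset_rules config_rules cli_rules
instance (bundle_rules : List String) (preset_rules : List String) (config_rules : List String) (cli_rules : List String) (out : List (String × String)) : Decidable (Spec_build_rule_sources_py bundle_rules preset_rules config_rules cli_rules out) := by unfold Spec_build_rule_sources_py; infer_instance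

-- ===== CLAIM =====
def Claim_equal_build_rule_sources_py : Prop := ∀ (bundle_rules : List String) (preset_rules : List String) (config_rules : List String) (cli_rules : List String), Dom_build_rule_sources_py bundle_rules preset_rules config_rules cli_rules → Spec_build_rule_sources_py bundle_rules preset_rules config_rules cli_rules (build_rule_sources_py bundle_rules preset_rules config_rules cli_rules)

-- ===== LEMMAS AND PROOFS =====

-- The guarded-insert loop body of A, abstracted over the label.
def pvGuard (l : String) (s : PySem.Dict String String) (rule : String) : PySem.Dict String String :=
  if s.contains rule then s else s.insert rule l

theorem pvGuard_keys (l : String) (xs : List String) (d : PySem.Dict String String) :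
    (xs.foldl (pvGuard l) d).keys = PySem.Set.update d.keys xs := by
  induction xs generalizing d with
  | nil => simp [PySem.Set.update]
  | cons x xs ih =>
    rw [List.foldl_cons, ih]
    have hk : (pvGuard l d x).keys = PySem.Set.add d.keys x := by
      by_cases h : d.contains x = true
      · have hm : x ∈ d.keys := (PySem.Dict.contains_iff_mem_keys d x).mp h
        simp [pvGuard, h, PySem.Set.add, hm]
      · have hm : ¬ x ∈ d.keys := fun m => h ((PySem.Dict.contains_iff_mem_keys d x).mpr m)
        rw [pvGuard, if_neg h,
          PySem.Dict.keys_insert_of_not_contains d l (Bool.not_eq_true _ ▸ h)]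
        simp [PySem.Set.add, hm]
    rw [hk]
    simp [PySem.Set.update]

theorem pvGuard_get? (l : String) (xs : List String) (d : PySem.Dict String String) (k : String) :
    (xs.foldl (pvGuard l) d).get? k =
      if d.contains k then d.get? k else if k ∈ xs then some l else none := by
  induction xs generalizing d with
  | nil => by_cases h : d.contains k = true <;> simp [h, PySem.Dict.get?_eq_none_iff_contains]
  | cons x xs ih =>
    simp only [List.foldl_cons, pvGuard]
    by_cases hx : d.contains x = true
    · rw [if_pos hx, ih]
      by_cases hk : d.contains k = true
      · simp [hk]
      · have hkx : ¬ k = x := fun e => by simp [e, hx] at hk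
        simp [hk, hkx]
    · rw [if_neg hx, ih]
      by_cases hkx : k = x
      · subst hkx
        rw [if_pos (PySem.Dict.contains_insert_self d k l),
          PySem.Dict.get?_insert_self, if_neg hx]
        simp
      · have h1 : (d.insert x l).contains k = d.contains k := by
          simp [PySem.Dict.contains_insert, hkx]
        have h2 : (d.insert x l).get? k = d.get? k :=
          PySem.Dict.get?_insert_of_ne d l hkx
        simp [h1, h2, hkx]

-- Set.update is foldl add, so updating ofList by a second list is ofList of the append.
theorem ofList_append (xs ys : List String) :
    PySem.Set.ofList (xs ++ ys) = PySem.Set.update (PySem.Set.ofList xs) ys := by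
  simp [PySem.Set.ofList_eq_foldl, PySem.Set.update, List.foldl_append]

-- ===== VERDICT =====
theorem build_rule_sources_py_spec : Claim_equal_build_rule_sources_py := by
  intro b p c cli _
  unfold Spec_build_rule_sources_py build_rule_sources_py build_rule_sources_py_alt
  simp only []
  set d1 := b.foldl (pvGuard "policy-bundle") PySem.Dict.empty with hd1
  set d2 := p.foldl (pvGuard "policy-preset") d1 with hd2
  set d3 := c.foldl (pvGuard "policy-config") d2 with hd3
  set d4 := cli.foldl (pvGuard "cli") d3 with hd4
  show d4.items = _
  have hk1 : d1.keys = PySem.Set.ofList b := by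
    rw [hd1, pvGuard_keys]
    simp [PySem.Set.ofList_eq_foldl, PySem.Set.update, PySem.Dict.keys_empty]
  have hk2 : d2.keys = PySem.Set.ofList (b ++ p) := by
    rw [hd2, pvGuard_keys, hk1, ← ofList_append]
  have hk3 : d3.keys = PySem.Set.ofList (b ++ p ++ c) := by
    rw [hd3, pvGuard_keys, hk2, ← ofList_append]
  have hk4 : d4.keys = PySem.Set.ofList (b ++ p ++ c ++ cli) := by
    rw [hd4, pvGuard_keys, hk3, ← ofList_append]
  have hnd : d4.keys.Nodup := by rw [hk4]; exact PySem.Set.nodup_ofList _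
  have hcont : ∀ (d : PySem.Dict String String) (xs : List String) (k : String),
      d.keys = PySem.Set.ofList xs → (d.contains k = true ↔ k ∈ xs) := by
    intro d xs k h
    rw [PySem.Dict.contains_iff_mem_keys, h, PySem.Set.mem_ofList]
  rw [PySem.Dict.items_eq_map_keys d4 hnd "", hk4, ← PySem.List.dedup_eq_ofList]
  apply List.map_congr_left
  intro k hk
  have hkmem : k ∈ b ++ p ++ c ++ cli := (PySem.List.mem_dedup _ k).mp hk
  congr 1
  have hget : d4.get? k =
      if k ∈ b then some "policy-bundle"
      else if k ∈ p then some "policy-preset"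
      else if k ∈ c then some "policy-config"
      else if k ∈ cli then some "cli" else none := by
    rw [hd4, pvGuard_get?]
    by_cases h3 : d3.contains k = true
    · rw [if_pos h3, hd3, pvGuard_get?]
      by_cases h2 : d2.contains k = true
      · rw [if_pos h2, hd2, pvGuard_get?]
        by_cases h1 : d1.contains k = true
        · have hb : k ∈ b := (hcont d1 b k hk1).mp h1
          rw [if_pos h1, hd1, pvGuard_get?]
          simp [hb]
        · have hb : ¬ k ∈ b := fun m => h1 ((hcont d1 b k hk1).mpr m)
          have hp : k ∈ p := by
            have h2' := (hcont d2 (b ++ p) k hk2).mp h2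
            simp only [List.mem_append] at h2'
            exact h2'.resolve_left hb
          rw [if_neg h1]
          simp [hb, hp]
      · have hbp : ¬ k ∈ b ++ p := fun m => h2 ((hcont d2 (b ++ p) k hk2).mpr m)
        simp only [List.mem_append, not_or] at hbp
        have hc : k ∈ c := by
          have h3' := (hcont d3 (b ++ p ++ c) k hk3).mp h3
          simp only [List.mem_append] at h3'
          tauto
        rw [if_neg h2]
        simp [hbp.1, hbp.2, hc]
    · have hbpc : ¬ k ∈ b ++ p ++ c := fun m => h3 ((hcont d3 (b ++ p ++ c) k hk3).mpr m)
      simp only [List.mem_append, not_or] at hbpc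
      have hcli : k ∈ cli := by
        simp only [List.mem_append] at hkmem
        tauto
      rw [if_neg h3]
      simp [hbpc.1.1, hbpc.1.2, hbpc.2, hcli]
  have hsc : ∀ (xs : List String), ((PySem.Set.ofList xs).contains k = true) = (k ∈ xs) := by
    intro xs
    rw [eq_iff_iff, PySem.Set.contains_iff, PySem.Set.mem_ofList]
  rw [PySem.Dict.getD_eq_get?_getD, hget]
  simp only [hsc]
  by_cases hb : k ∈ b
  · simp [hb]
  · by_cases hp : k ∈ p
    · simp [hb, hp]
    · by_cases hc : k ∈ c
      · simp [hb, hp, hc]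
      · have hcli : k ∈ cli := by
          simp only [List.mem_append] at hkmem
          tauto
        simp [hb, hp, hc, hcli]
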